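-- pv_equiv track=rewrite | github.com/coolman-success/CodeSignalPractice | Arcade/The Core/11 - Spring of Integration/90 - Pair of Shoes.py | solution
-- ===== SOURCE A (Python) =====
-- def solution(shoes):
--
--     lefts, rights = [], []
--
--     for side in shoes:
--         if side[0] == 0:
--             lefts.append(side[1])
--         else:
--             rights.append(side[1])
--
--     return sorted(lefts) == sorted(rights)
-- ===== SOURCE B (Python) =====
-- def solution(shoes):
--     bal = {}
--     for side in shoes:
--         bal[side[1]] = bal.get(side[1], 0) + (1 if side[0] == 0 else -1)
--     return all(v == 0 for v in bal.values())
-- ===== Notes on version B (the rewrite author's own statement) =====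
-- stated objective: alternative
-- what changed: Replaces the two accumulated lists plus sort-and-compare with a single signed net-count dictionary (+1 for a left shoe, -1 for a right shoe per size) followed by an all-zero check, removing the sorting entirely.
import Mathlib
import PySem

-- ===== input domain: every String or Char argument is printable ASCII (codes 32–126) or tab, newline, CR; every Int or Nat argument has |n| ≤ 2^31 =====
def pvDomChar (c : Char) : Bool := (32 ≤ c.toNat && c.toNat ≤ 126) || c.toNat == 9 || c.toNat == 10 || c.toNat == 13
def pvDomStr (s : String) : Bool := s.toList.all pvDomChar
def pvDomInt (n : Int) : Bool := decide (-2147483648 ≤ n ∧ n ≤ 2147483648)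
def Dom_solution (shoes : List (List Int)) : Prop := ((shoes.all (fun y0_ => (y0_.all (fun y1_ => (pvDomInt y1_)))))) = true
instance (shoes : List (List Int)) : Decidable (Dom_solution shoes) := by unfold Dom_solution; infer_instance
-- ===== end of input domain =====

-- B replaces A's two accumulated lists + sort-and-compare by one signed net-count dictionary
-- (+1 left, -1 right per size) checked all-zero: a different algorithm of similar cost (no sorting).


-- ===== PORT A =====
-- A: partition side[1] into lefts/rights by side[0]==0, then compare the sorted lists.
def solution (shoes : List (List Int)) : Bool :=
  let p := shoes.foldl
    (fun (lr : List Int × List Int) side =>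
      if PySem.List.pyGetD side 0 0 = 0 then (lr.1 ++ [PySem.List.pyGetD side 1 0], lr.2)
      else (lr.1, lr.2 ++ [PySem.List.pyGetD side 1 0]))
    ([], [])
  PySem.List.sorted p.1 (fun x => x) false == PySem.List.sorted p.2 (fun x => x) false

-- ===== PORT B =====
-- B: one signed balance dict bal[size] += (+1 if left else -1); return all values zero.
def solution_alt (shoes : List (List Int)) : Bool :=
  let bal := shoes.foldl
    (fun (d : PySem.Dict Int Int) side =>
      d.insert (PySem.List.pyGetD side 1 0)
        (d.getD (PySem.List.pyGetD side 1 0) 0 + (if PySem.List.pyGetD side 0 0 = 0 then 1 else -1)))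
    PySem.Dict.empty
  bal.values.all (fun v => v == 0)

-- ===== PRECONDITION & SPEC =====
-- Both Pythons index side[0] and side[1] of every element: a side shorter than 2 raises IndexError
-- in A and in B alike, so exactly those inputs are excluded.
def Pre_solution (shoes : List (List Int)) : Prop := ∀ side ∈ shoes, 2 ≤ side.length
instance (shoes : List (List Int)) : Decidable (Pre_solution shoes) := by unfold Pre_solution; infer_instance
def pvWitness_solution : List (List Int) := [[0, 5], [1, 5], [0, 7], [1, 7]]

def Spec_solution (shoes : List (List Int)) (out : Bool) : Prop := out = solution_alt shoes
instance (shoes : List (List Int)) (out : Bool) : Decidable (Spec_solution shoes out) := by unfold Spec_solution; infer_instance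

-- ===== CLAIM (what is proved, stated in full; the proofs are below) =====
def Claim_equal_solution : Prop := ∀ (shoes : List (List Int)), Dom_solution shoes → Pre_solution shoes → Spec_solution shoes (solution shoes)

-- ===== LEMMAS AND PROOFS =====

def pvKey (s : List Int) : Int := PySem.List.pyGetD s 1 0
def pvPos (s : List Int) : Bool := PySem.List.pyGetD s 0 0 == 0
def pvL (shoes : List (List Int)) : List Int := (shoes.filter pvPos).map pvKey
def pvR (shoes : List (List Int)) : List Int := (shoes.filter (fun s => !pvPos s)).map pvKey

lemma pvA_fold (shoes : List (List Int)) : ∀ (l r : List Int),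
    shoes.foldl
      (fun (lr : List Int × List Int) side =>
        if PySem.List.pyGetD side 0 0 = 0 then (lr.1 ++ [PySem.List.pyGetD side 1 0], lr.2)
        else (lr.1, lr.2 ++ [PySem.List.pyGetD side 1 0]))
      (l, r) = (l ++ pvL shoes, r ++ pvR shoes) := by
  induction shoes with
  | nil => intro l r; simp [pvL, pvR]
  | cons s t ih =>
    intro l r
    by_cases h : PySem.List.pyGetD s 0 0 = 0 <;>
      simp [pvL, pvR, pvPos, pvKey, h, ih]

lemma pvB_getD (shoes : List (List Int)) : ∀ (d : PySem.Dict Int Int) (k : Int),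
    (shoes.foldl
      (fun (d : PySem.Dict Int Int) side =>
        d.insert (PySem.List.pyGetD side 1 0)
          (d.getD (PySem.List.pyGetD side 1 0) 0 + (if PySem.List.pyGetD side 0 0 = 0 then 1 else -1)))
      d).getD k 0
    = d.getD k 0 + ((pvL shoes).count k : Int) - ((pvR shoes).count k : Int) := by
  induction shoes with
  | nil => intro d k; simp [pvL, pvR]
  | cons s t ih =>
    intro d k
    simp only [List.foldl_cons, ih, PySem.Dict.getD_insert]
    by_cases hk : k = PySem.List.pyGetD s 1 0 <;>
    by_cases hp : PySem.List.pyGetD s 0 0 = 0 <;>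
      simp [pvL, pvR, pvPos, pvKey, hk, hp, List.count_cons] <;> omega

lemma pv_mem_of_mem_pvL {shoes : List (List Int)} {k : Int} (h : k ∈ pvL shoes) :
    k ∈ shoes.map pvKey := by
  rcases List.mem_map.1 h with ⟨s, hs, rfl⟩
  exact List.mem_map_of_mem (List.mem_of_mem_filter hs)

lemma pv_mem_of_mem_pvR {shoes : List (List Int)} {k : Int} (h : k ∈ pvR shoes) :
    k ∈ shoes.map pvKey := by
  rcases List.mem_map.1 h with ⟨s, hs, rfl⟩
  exact List.mem_map_of_mem (List.mem_of_mem_filter hs)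

lemma pv_alt_iff (shoes : List (List Int)) :
    solution_alt shoes = true ↔ ∀ k : Int, (pvL shoes).count k = (pvR shoes).count k := by
  show (List.foldl _ PySem.Dict.empty shoes).values.all (fun v => v == 0) = true ↔ _
  set step := fun (d : PySem.Dict Int Int) (side : List Int) =>
      d.insert (PySem.List.pyGetD side 1 0)
        (d.getD (PySem.List.pyGetD side 1 0) 0 + (if PySem.List.pyGetD side 0 0 = 0 then 1 else -1))
    with hstep
  have hnd : (shoes.foldl step PySem.Dict.empty).keys.Nodup := by
    rw [hstep]
    exact PySem.Dict.nodup_keys_foldl_insert_key shoes (fun s => PySem.List.pyGetD s 1 0) _ _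
      PySem.Dict.nodup_keys_empty
  have hkeys : (shoes.foldl step PySem.Dict.empty).keys
      = PySem.Set.update (PySem.Dict.empty (κ := Int) (ν := Int)).keys (shoes.map pvKey) := by
    rw [hstep]
    exact PySem.Dict.keys_foldl_insert_key shoes (fun s => PySem.List.pyGetD s 1 0) _ _
  have hvals := PySem.Dict.values_eq_map_keys (shoes.foldl step PySem.Dict.empty) hnd 0
  rw [hvals]
  simp only [List.all_eq_true, List.mem_map, beq_iff_eq]
  constructor
  · intro h k
    by_cases hk : k ∈ (shoes.foldl step PySem.Dict.empty).keys
    · have h0 : (shoes.foldl step PySem.Dict.empty).getD k 0 = 0 := h _ ⟨k, hk, rfl⟩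
      rw [hstep] at h0
      rw [pvB_getD shoes PySem.Dict.empty k] at h0
      simp [PySem.Dict.getD_empty] at h0
      omega
    · rw [hkeys] at hk
      simp only [PySem.Set.mem_update, PySem.Dict.keys_empty, List.not_mem_nil, false_or] at hk
      have h1 : k ∉ pvL shoes := fun hm => hk (pv_mem_of_mem_pvL hm)
      have h2 : k ∉ pvR shoes := fun hm => hk (pv_mem_of_mem_pvR hm)
      rw [List.count_eq_zero.2 h1, List.count_eq_zero.2 h2]
  · rintro h v ⟨k, _, rfl⟩
    rw [hstep, pvB_getD shoes PySem.Dict.empty k]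
    simp [PySem.Dict.getD_empty]
    have := h k
    omega

lemma pv_a_iff (shoes : List (List Int)) :
    solution shoes = true ↔ (pvL shoes).Perm (pvR shoes) := by
  unfold solution
  rw [pvA_fold shoes [] []]
  simp only [List.nil_append, beq_iff_eq]
  exact PySem.List.sorted_id_eq_sorted_id_iff_perm (pvL shoes) (pvR shoes)

-- ===== VERDICT (by name: the statement is the Claim_ definition above) =====
theorem solution_spec : Claim_equal_solution := by
  intro shoes _ _
  unfold Spec_solution
  have : (solution shoes = true) ↔ (solution_alt shoes = true) := by
    rw [pv_a_iff, pv_alt_iff, List.perm_iff_count]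
  cases hA : solution shoes <;> cases hB : solution_alt shoes <;> simp_all
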